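-- pv_equiv track=rewrite | github.com/S0S-90/useful_scripts | mathematical_function_collection.py | zahlen_links_oben
-- ===== SOURCE A (Python) =====
-- def zahlen_links_oben(seitenlaenge):
--     """gibt die Zahlen der Diagonalenhälfte links oben aus einer spiralförmigen Zahlenmatrix der Seitenlänge seitenlaenge als Liste aus (ohne 1)"""
--     anzahl = int((seitenlaenge-1)/2)
--     zahl = 1
--     summand = 4
--     zahlen = []
--     for i in range(anzahl):
--         zahl = zahl + summand
--         zahlen.append(zahl)
--         summand = summand + 8
--     return zahlen
-- ===== SOURCE B (Python) =====
-- def zahlen_links_oben(seitenlaenge):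
--     """gibt die Zahlen der Diagonalenhälfte links oben aus einer spiralförmigen Zahlenmatrix der Seitenlänge seitenlaenge als Liste aus (ohne 1)"""
--     anzahl = int((seitenlaenge-1)/2)
--     return [4*(k+1)**2 + 1 for k in range(anzahl)]
-- ===== Notes on version B (the rewrite author's own statement) =====
-- stated objective: simpler
-- what changed: Replaced the running-sum loop (accumulating zahl and summand) by the closed form 4*(k+1)**2 + 1 for the k-th diagonal number, computed directly per index.
import Mathlib
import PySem

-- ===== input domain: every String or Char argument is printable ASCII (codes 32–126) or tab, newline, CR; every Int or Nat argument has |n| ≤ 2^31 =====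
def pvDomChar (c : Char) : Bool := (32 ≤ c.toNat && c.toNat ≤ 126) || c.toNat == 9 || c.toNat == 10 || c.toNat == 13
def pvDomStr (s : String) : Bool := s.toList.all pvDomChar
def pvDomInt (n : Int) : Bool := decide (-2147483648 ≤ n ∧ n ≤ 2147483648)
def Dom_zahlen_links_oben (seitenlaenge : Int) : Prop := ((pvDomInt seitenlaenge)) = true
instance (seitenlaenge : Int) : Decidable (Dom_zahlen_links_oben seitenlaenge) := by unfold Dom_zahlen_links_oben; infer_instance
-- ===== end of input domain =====

-- B replaces A's running-sum loop by the closed form 4*(k+1)^2 + 1 per index (objective: simpler).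

-- ===== PORT A =====
-- int((seitenlaenge-1)/2): float division by 2 is exact for |n| ≤ 2^31 and int() truncates
-- toward zero, so this is exactly Int.tdiv on the stated domain.
def zahlen_links_oben (seitenlaenge : Int) : List Int :=
  let anzahl : Int := (seitenlaenge - 1).tdiv 2
  let st := (PySem.List.pyRange 0 anzahl 1).foldl
    (fun (st : Int × Int × List Int) _ =>
      let zahl := st.1 + st.2.1
      (zahl, st.2.1 + 8, st.2.2 ++ [zahl])) (1, 4, [])
  st.2.2

-- ===== PORT B =====
def zahlen_links_oben_alt (seitenlaenge : Int) : List Int :=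
  let anzahl : Int := (seitenlaenge - 1).tdiv 2
  (List.range anzahl.toNat).map (fun (k : Nat) => 4 * ((k : Int) + 1) ^ 2 + 1)

-- ===== PRECONDITION & SPEC =====
def Spec_zahlen_links_oben (seitenlaenge : Int) (out : List Int) : Prop := out = zahlen_links_oben_alt seitenlaenge
instance (seitenlaenge : Int) (out : List Int) : Decidable (Spec_zahlen_links_oben seitenlaenge out) := by unfold Spec_zahlen_links_oben; infer_instance

-- ===== CLAIM (what is proved, stated in full; the proofs are below) =====
def Claim_equal_zahlen_links_oben : Prop := ∀ (seitenlaenge : Int), Dom_zahlen_links_oben seitenlaenge → Spec_zahlen_links_oben seitenlaenge (zahlen_links_oben seitenlaenge)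

-- ===== LEMMAS AND PROOFS =====

-- The loop body, with the ignored loop index made explicit.
def pvStep (st : Int × Int × List Int) (_i : Nat) : Int × Int × List Int :=
  let zahl := st.1 + st.2.1
  (zahl, st.2.1 + 8, st.2.2 ++ [zahl])

-- Loop invariant: after m iterations the state is (4m²+1, 8m+4, the closed-form list).
lemma pvLoop (m : Nat) :
    (List.range m).foldl pvStep (1, 4, []) =
      (4 * (m : Int) ^ 2 + 1, 8 * (m : Int) + 4,
        (List.range m).map (fun (k : Nat) => 4 * ((k : Int) + 1) ^ 2 + 1)) := by
  induction m with
  | zero => simp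
  | succ n ih =>
    rw [List.range_succ, List.foldl_append, ih, List.map_append]
    simp only [List.foldl_cons, List.foldl_nil, pvStep, List.map_cons, List.map_nil]
    push_cast
    refine Prod.ext (by ring) (Prod.ext (by ring) ?_)
    congr 1
    simp only [List.cons.injEq, and_true]
    ring

-- ===== VERDICT (by name: the statement is the Claim_ definition above) =====
theorem zahlen_links_oben_spec : Claim_equal_zahlen_links_oben := by
  intro s _
  unfold Spec_zahlen_links_oben zahlen_links_oben zahlen_links_oben_alt
  simp only
  rw [PySem.List.pyRange_one]
  rw [List.foldl_map]
  have h : (fun (st : Int × Int × List Int) (k : Nat) =>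
      (fun (st : Int × Int × List Int) _ =>
        let zahl := st.1 + st.2.1
        (zahl, st.2.1 + 8, st.2.2 ++ [zahl])) st ((0 : Int) + k)) = pvStep := by
    funext st k; rfl
  rw [h, show ((s - 1).tdiv 2 - 0).toNat = ((s - 1).tdiv 2).toNat by ring_nf, pvLoop]
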